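-- pv_equiv track=rewrite | github.com/sunjin7725/- | 선입 선출 스케줄링.py | reform_to_result_format
-- ===== SOURCE A (Python) =====
-- def reform_to_result_format(t_list):
--     result_form = []
--     for idx, t in enumerate(t_list):
--         if idx == len(t_list)-1:
--             result_form.extend(t)
--         else:
--             result_form.append(t[0])
--     return result_form
-- ===== SOURCE B (Python) =====
-- def reform_to_result_format(t_list):
--     if not t_list:
--         return []
--     head, *rest = t_list
--     if not rest:
--         return list(head)
--     return [head[0]] + reform_to_result_format(rest)
-- ===== Notes on version B (the rewrite author's own statement) =====
-- stated objective: alternative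
-- what changed: Replaces A's indexed enumerate loop with its len-1 comparison by structural recursion on the list: the singleton tail is the base case returned whole, otherwise the head's first item is prepended to the recursive result; no indices or lengths are ever computed.
import Mathlib
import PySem

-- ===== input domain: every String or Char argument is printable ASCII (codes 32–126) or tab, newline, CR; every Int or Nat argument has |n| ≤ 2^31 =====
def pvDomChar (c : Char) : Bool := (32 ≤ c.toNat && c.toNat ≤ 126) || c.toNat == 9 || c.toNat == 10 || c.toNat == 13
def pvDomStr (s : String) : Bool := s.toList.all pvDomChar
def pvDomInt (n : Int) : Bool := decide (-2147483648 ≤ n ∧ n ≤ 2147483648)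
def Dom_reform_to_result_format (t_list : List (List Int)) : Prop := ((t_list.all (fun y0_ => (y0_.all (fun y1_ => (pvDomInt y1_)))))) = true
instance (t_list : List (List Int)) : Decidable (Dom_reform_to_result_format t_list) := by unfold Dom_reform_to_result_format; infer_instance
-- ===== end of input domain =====

-- B replaces A's indexed loop (branching on idx == len-1) by structural recursion on
-- the list, returning the last element whole as the base case; objective: alternative.


-- ===== PORT A =====
-- for idx, t in enumerate(t_list): if idx == len(t_list)-1: extend(t) else: append(t[0])
-- t[0] is PySem.List.pyGetD _ 0 0: exact under Pre_ (every non-last t is nonempty).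
def reform_to_result_format (t_list : List (List Int)) : List Int :=
  (PySem.List.enumerate t_list 0).foldl
    (fun result_form p =>
      if p.1 = (t_list.length : Int) - 1 then result_form ++ p.2
      else result_form ++ [PySem.List.pyGetD p.2 0 0]) []

-- ===== PORT B =====
-- structural recursion: [] -> []; [last] -> last; head :: rest -> head[0] :: recurse rest
def reform_to_result_format_alt : List (List Int) → List Int
  | [] => []
  | [t] => t
  | t :: rest => PySem.List.pyGetD t 0 0 :: reform_to_result_format_alt rest

-- ===== PRECONDITION & SPEC =====
-- Pre_: every element except the last is nonempty — on an empty non-last inner list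
-- Python A (t[0]) raises IndexError (and B raises there too).
def Pre_reform_to_result_format (t_list : List (List Int)) : Prop :=
  ∀ t ∈ t_list.dropLast, t ≠ []
instance (t_list : List (List Int)) : Decidable (Pre_reform_to_result_format t_list) := by
  unfold Pre_reform_to_result_format; infer_instance
def pvWitness_reform_to_result_format : List (List Int) := [[1, 2], [3], [4, 5]]

def Spec_reform_to_result_format (t_list : List (List Int)) (out : List Int) : Prop := out = reform_to_result_format_alt t_list
instance (t_list : List (List Int)) (out : List Int) : Decidable (Spec_reform_to_result_format t_list out) := by unfold Spec_reform_to_result_format; infer_instance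

-- ===== CLAIM (what is proved, stated in full; the proofs are below) =====
def Claim_equal_reform_to_result_format : Prop := ∀ (t_list : List (List Int)), Dom_reform_to_result_format t_list → Pre_reform_to_result_format t_list → Spec_reform_to_result_format t_list (reform_to_result_format t_list)

-- ===== LEMMAS AND PROOFS =====

-- A's loop over xs ++ [last], started at index s with s + |xs| equal to the branch
-- constant N, collects the heads of xs and then appends last whole.
lemma reform_foldl_split (N : Int) :
    ∀ (xs : List (List Int)) (last : List Int) (s : Int) (acc : List Int),
      s + (xs.length : Int) = N →
      (PySem.List.enumerate (xs ++ [last]) s).foldl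
        (fun result_form p =>
          if p.1 = N then result_form ++ p.2
          else result_form ++ [PySem.List.pyGetD p.2 0 0]) acc
      = acc ++ xs.map (fun t => PySem.List.pyGetD t 0 0) ++ last := by
  intro xs
  induction xs with
  | nil =>
      intro last s acc hs
      simp at hs
      simp [PySem.List.enumerate_cons, PySem.List.enumerate_nil, hs]
  | cons x xs ih =>
      intro last s acc hs
      have hne : s ≠ N := by
        have hl : ((x :: xs).length : Int) = (xs.length : Int) + 1 := by simp
        omega
      rw [List.cons_append, PySem.List.enumerate_cons, List.foldl_cons]
      simp only [hne, if_false]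
      rw [ih last (s + 1) _ (by
        have hl : ((x :: xs).length : Int) = (xs.length : Int) + 1 := by simp
        omega)]
      simp

-- B's recursion on ys ++ [last] produces the heads of ys followed by last whole.
lemma alt_concat (ys : List (List Int)) (last : List Int) :
    reform_to_result_format_alt (ys ++ [last])
      = ys.map (fun t => PySem.List.pyGetD t 0 0) ++ last := by
  induction ys with
  | nil => simp [reform_to_result_format_alt]
  | cons y ys' ih =>
      rcases h : ys' ++ [last] with _ | ⟨a, l⟩
      · exact absurd h (by simp)
      · rw [List.cons_append, h]
        show PySem.List.pyGetD y 0 0 :: reform_to_result_format_alt (a :: l) = _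
        rw [← h, ih]
        simp

theorem reform_to_result_format_spec : Claim_equal_reform_to_result_format := by
  intro t_list _ _
  unfold Spec_reform_to_result_format
  rcases t_list.eq_nil_or_concat with rfl | ⟨ys, last, rfl⟩
  · simp [reform_to_result_format, reform_to_result_format_alt, PySem.List.enumerate_nil]
  · rw [List.concat_eq_append, alt_concat]
    unfold reform_to_result_format
    rw [reform_foldl_split (((ys ++ [last]).length : Int) - 1) ys last 0 []
      (by simp)]
    simp
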